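-- pv_equiv track=rewrite | github.com/AImenes/Project-Euler | python/problem116.py | red
-- ===== SOURCE A (Python) =====
-- def red(length_of_gray_tiles):
-- 	number_of_combinations = [0 for i in range(length_of_gray_tiles+1)]
-- 	for i in range(length_of_gray_tiles+1):
-- 		if i < 2:
-- 			number_of_combinations[i] = 0
-- 		elif i == 2:
-- 			number_of_combinations[i] = 1
-- 		else:
-- 			number_of_combinations[i] = number_of_combinations[i-1] + number_of_combinations[i-2] + 1
-- 	return number_of_combinations[length_of_gray_tiles]
-- ===== SOURCE B (Python) =====
-- def red(length_of_gray_tiles):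
--     # Closed form: red(n) = Fib(n+1) - 1, computed by fast-doubling in O(log n).
--     if length_of_gray_tiles < 0:
--         raise ValueError("length must be nonnegative")
--
--     def fib_pair(k):
--         # returns (F(k), F(k+1))
--         if k == 0:
--             return (0, 1)
--         a, b = fib_pair(k >> 1)
--         c = a * (2 * b - a)
--         d = a * a + b * b
--         if k & 1:
--             return (d, c + d)
--         return (c, d)
--
--     return fib_pair(length_of_gray_tiles + 1)[0] - 1
-- ===== Notes on version B (the rewrite author's own statement) =====
-- stated objective: faster
-- what changed: Replaced the O(n) DP array (f(i)=f(i-1)+f(i-2)+1) by the closed form red(n)=Fib(n+1)-1 computed with fast-doubling Fibonacci in O(log n) big-int operations.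
-- outside the precondition, e.g. on red(-1): A raises IndexError, B raises ValueError
import Mathlib
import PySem

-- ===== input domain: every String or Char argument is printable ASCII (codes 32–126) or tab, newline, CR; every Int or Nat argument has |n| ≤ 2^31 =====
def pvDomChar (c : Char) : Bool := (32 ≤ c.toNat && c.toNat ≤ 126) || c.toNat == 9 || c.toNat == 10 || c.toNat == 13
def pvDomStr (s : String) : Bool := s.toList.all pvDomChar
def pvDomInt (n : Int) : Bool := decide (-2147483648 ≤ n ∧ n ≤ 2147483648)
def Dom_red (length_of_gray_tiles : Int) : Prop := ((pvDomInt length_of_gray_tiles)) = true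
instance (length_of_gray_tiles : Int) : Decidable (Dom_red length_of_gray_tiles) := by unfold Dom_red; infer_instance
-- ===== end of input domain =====

-- B replaces A's O(n) DP array with the closed form red(n) = Fib(n+1) - 1 via fast-doubling
-- Fibonacci (O(log n) big-int operations; a timing run measured the speed-up).

-- ===== PORT A =====
-- one iteration of A's for-loop body: number_of_combinations[i] = …
def redStep (lst : List Int) (i : Int) : List Int :=
  PySem.List.pySetD lst i
    (if i < 2 then 0
     else if i = 2 then 1
     else PySem.List.pyGetD lst (i - 1) 0 + PySem.List.pyGetD lst (i - 2) 0 + 1)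

def red (length_of_gray_tiles : Int) : Int :=
  let init := (PySem.List.pyRange 0 (length_of_gray_tiles + 1) 1).map (fun _ => (0 : Int))
  let lst := (PySem.List.pyRange 0 (length_of_gray_tiles + 1) 1).foldl redStep init
  PySem.List.pyGetD lst length_of_gray_tiles 0

-- ===== PORT B =====
-- fib_pair of Source B: returns (F(k), F(k+1)); on Pre_'s nonnegative inputs Python's
-- k >> 1 and k & 1 are exactly Nat's k / 2 and k % 2.
def fibPair (k : Nat) : Int × Int :=
  if h : k = 0 then (0, 1)  -- h used by decreasing_by
  else
    let p := fibPair (k / 2)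
    let c := p.1 * (2 * p.2 - p.1)
    let d := p.1 * p.1 + p.2 * p.2
    if k % 2 = 1 then (d, c + d) else (c, d)
decreasing_by exact Nat.div_lt_self (Nat.pos_of_ne_zero h) one_lt_two

def red_alt (length_of_gray_tiles : Int) : Int :=
  (fibPair (length_of_gray_tiles + 1).toNat).1 - 1

-- ===== PRECONDITION & SPEC =====
-- Pre_ excludes negative input, on which A raises IndexError (and B raises ValueError).
def Pre_red (length_of_gray_tiles : Int) : Prop := 0 ≤ length_of_gray_tiles
instance (length_of_gray_tiles : Int) : Decidable (Pre_red length_of_gray_tiles) := by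
  unfold Pre_red; infer_instance
def pvWitness_red : Int := 5

def Spec_red (length_of_gray_tiles : Int) (out : Int) : Prop := out = red_alt length_of_gray_tiles
instance (length_of_gray_tiles : Int) (out : Int) : Decidable (Spec_red length_of_gray_tiles out) := by unfold Spec_red; infer_instance

-- ===== CLAIM (what is proved, stated in full; the proofs are below) =====
def Claim_equal_red : Prop := ∀ (length_of_gray_tiles : Int), Dom_red length_of_gray_tiles → Pre_red length_of_gray_tiles → Spec_red length_of_gray_tiles (red length_of_gray_tiles)

-- ===== LEMMAS AND PROOFS =====

-- the value A's DP computes at cell i (proved below for both ports)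
def gRed (i : Nat) : Int := (Nat.fib (i + 1) : Int) - 1

theorem fib_two_mul_int (m : Nat) :
    (Nat.fib (2 * m) : Int) = (Nat.fib m : Int) * (2 * (Nat.fib (m + 1) : Int) - Nat.fib m) := by
  have h : Nat.fib m ≤ 2 * Nat.fib (m + 1) := by
    have := Nat.fib_le_fib_succ (n := m); omega
  rw [Nat.fib_two_mul, Nat.cast_mul, Nat.cast_sub h]
  push_cast; ring

theorem fib_two_mul_add_one_int (m : Nat) :
    (Nat.fib (2 * m + 1) : Int) = (Nat.fib m : Int) * Nat.fib m + (Nat.fib (m + 1) : Int) * Nat.fib (m + 1) := by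
  rw [Nat.fib_two_mul_add_one]; push_cast; ring

theorem fibPair_eq (k : Nat) : fibPair k = ((Nat.fib k : Int), (Nat.fib (k + 1) : Int)) := by
  induction k using Nat.strong_induction_on with
  | _ k ih =>
    rw [fibPair]
    by_cases h : k = 0
    · subst h; simp
    · rw [dif_neg h, ih (k / 2) (Nat.div_lt_self (Nat.pos_of_ne_zero h) one_lt_two)]
      set m := k / 2 with hm
      have hc : (Nat.fib m : Int) * (2 * (Nat.fib (m + 1) : Int) - Nat.fib m) = (Nat.fib (2 * m) : Int) :=
        (fib_two_mul_int m).symm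
      have hd : (Nat.fib m : Int) * Nat.fib m + (Nat.fib (m + 1) : Int) * Nat.fib (m + 1) = (Nat.fib (2 * m + 1) : Int) :=
        (fib_two_mul_add_one_int m).symm
      by_cases hp : k % 2 = 1
      · have hk : k = 2 * m + 1 := by omega
        simp only [hp]
        rw [hc, hd, hk]
        have : Nat.fib (2 * m + 1 + 1) = Nat.fib (2 * m) + Nat.fib (2 * m + 1) := Nat.fib_add_two
        rw [this]
        push_cast; ring_nf
      · have hk : k = 2 * m := by omega
        simp only [hp, if_false]
        rw [hc, hd, hk]

-- the loop invariant for A's DP array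
theorem red_loop_inv (m : Nat) (j : Nat) (hj : j ≤ m) :
    ∃ lst, ((PySem.List.pyRange 0 (j : Int) 1).foldl redStep
        ((PySem.List.pyRange 0 (m : Int) 1).map (fun _ => (0 : Int))) = lst) ∧
      lst.length = m ∧
      (∀ i : Nat, i < m → PySem.List.pyGetD lst (i : Int) 0 = if i < j then gRed i else 0) := by
  induction j with
  | zero =>
    have h0 : PySem.List.pyRange 0 ((0 : Nat) : Int) 1 = [] :=
      PySem.List.pyRange_one_eq_nil (by norm_num)
    refine ⟨_, rfl, ?_, ?_⟩
    · simp [PySem.List.length_pyRange_one]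
    · intro i hi
      rw [h0, List.foldl_nil, PySem.List.pyGetD_map_pyRange (fun _ => (0 : Int)) m i 0 hi]
      simp
  | succ j ihj =>
    obtain ⟨lst, hfold, hlen, hget⟩ := ihj (by omega)
    have hsplit : PySem.List.pyRange 0 ((j : Int) + 1) 1
        = PySem.List.pyRange 0 (j : Int) 1 ++ [(j : Int)] :=
      PySem.List.pyRange_one_succ_right (by positivity)
    have hcast : ((j + 1 : Nat) : Int) = (j : Int) + 1 := by push_cast; ring
    refine ⟨redStep lst (j : Int), ?_, ?_, ?_⟩
    · rw [hcast, hsplit, List.foldl_append, hfold]; rfl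
    · unfold redStep
      simp [hlen]
    · intro i hi
      have hjm : j < m := by omega
      -- the value written at cell j is gRed j
      have hval : (if (j : Int) < 2 then (0 : Int)
          else if (j : Int) = 2 then 1
          else PySem.List.pyGetD lst ((j : Int) - 1) 0 + PySem.List.pyGetD lst ((j : Int) - 2) 0 + 1)
          = gRed j := by
        by_cases h2 : j < 2
        · rw [if_pos (by exact_mod_cast h2)]
          interval_cases j <;> simp [gRed]
        · rw [if_neg (by exact_mod_cast h2)]
          by_cases h3 : j = 2
          · subst h3; norm_num [gRed]
          · rw [if_neg (by exact_mod_cast h3)]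
            have e1 : (j : Int) - 1 = ((j - 1 : Nat) : Int) := by omega
            have e2 : (j : Int) - 2 = ((j - 2 : Nat) : Int) := by omega
            rw [e1, e2, hget (j - 1) (by omega), hget (j - 2) (by omega),
              if_pos (by omega), if_pos (by omega)]
            unfold gRed
            have ej1 : j - 1 + 1 = j := by omega
            have ej2 : j - 2 + 1 = j - 1 := by omega
            rw [ej1, ej2]
            have hfib : Nat.fib (j + 1) = Nat.fib (j - 1) + Nat.fib (j - 1 + 1) := by
              have := Nat.fib_add_two (n := j - 1)
              have e : j - 1 + 2 = j + 1 := by omega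
              rw [e] at this; exact this
            have hfib' : ((Nat.fib (j + 1) : Int)) = (Nat.fib (j - 1) : Int) + (Nat.fib (j - 1 + 1) : Int) := by
              exact_mod_cast hfib
            have ej3 : j - 1 + 1 = j := by omega
            rw [ej3] at hfib'
            omega
      unfold redStep
      rw [hval]
      have := PySem.List.pyGetD_pySetD_natCast (xs := lst) (n := j) (m := i) (v := gRed j) (d := 0)
        (by omega)
      rw [this, hget i hi]
      by_cases hij : i = j
      · subst hij; simp
      · rw [if_neg (by exact_mod_cast hij)]
        by_cases hlt : i < j
        · rw [if_pos hlt, if_pos (by omega)]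
        · rw [if_neg hlt, if_neg (by omega)]

-- ===== VERDICT (by name: the statement is the Claim_ definition above) =====
theorem red_spec : Claim_equal_red := by
  intro n _ hpre
  have h0 : (0 : Int) ≤ n := hpre
  unfold Spec_red red red_alt
  dsimp only
  obtain ⟨lst, hfold, hlen, hget⟩ := red_loop_inv (n.toNat + 1) (n.toNat + 1) le_rfl
  have hm : (n + 1 : Int) = ((n.toNat + 1 : Nat) : Int) := by omega
  rw [hm, hfold]
  have hn : n = ((n.toNat : Nat) : Int) := by omega
  rw [show PySem.List.pyGetD lst n 0 = PySem.List.pyGetD lst ((n.toNat : Nat) : Int) 0 by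
    rw [← hn]]
  rw [hget n.toNat (by omega), if_pos (by omega), fibPair_eq]
  have ht : ((n.toNat + 1 : Nat) : Int).toNat = n.toNat + 1 := by omega
  rw [ht]
  simp [gRed]
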